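-- pv_equiv track=rewrite | github.com/Agents365-ai/zotero-cli-cc | src/zotero_cli_cc/cli.py | _hoist_global_flags
-- ===== SOURCE A (Python) =====
-- def _hoist_global_flags(args: list[str]) -> list[str]:
--     """Move `--json` / `--no-json` to the front so they parse regardless of position.
--
--     Agents trained on the GNU "flag travels with the subcommand" convention
--     write `zot search --json "x"`; without this, Click reports the flag as
--     unknown for the subcommand. The two affected tokens are pure flags (no
--     value) and are not redefined by any subcommand, so unconditional hoisting
--     is safe. Tokens after `--` are left untouched.
--     """
--     flags: list[str] = []
--     rest: list[str] = []
--     seen_double_dash = False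
--     for tok in args:
--         if seen_double_dash:
--             rest.append(tok)
--             continue
--         if tok == "--":
--             seen_double_dash = True
--             rest.append(tok)
--             continue
--         if tok in ("--json", "--no-json"):
--             flags.append(tok)
--         else:
--             rest.append(tok)
--     return flags + rest
-- ===== SOURCE B (Python) =====
-- def _hoist_global_flags(args: list[str]) -> list[str]:
--     """Hoist --json/--no-json: find the '--' cut first, then partition the prefix."""
--     try:
--         cut = args.index('--')
--     except ValueError:
--         cut = len(args)
--     head, tail = args[:cut], args[cut:]
--     flags = [t for t in head if t in ('--json', '--no-json')]
--     rest = [t for t in head if t not in ('--json', '--no-json')] + tail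
--     return flags + rest
-- ===== Notes on version B (the rewrite author's own statement) =====
-- stated objective: simpler
-- what changed: Replaces the seen_double_dash state machine with a pre-computed cut index at the first '--' followed by two filter comprehensions over the prefix only.
import Mathlib
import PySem

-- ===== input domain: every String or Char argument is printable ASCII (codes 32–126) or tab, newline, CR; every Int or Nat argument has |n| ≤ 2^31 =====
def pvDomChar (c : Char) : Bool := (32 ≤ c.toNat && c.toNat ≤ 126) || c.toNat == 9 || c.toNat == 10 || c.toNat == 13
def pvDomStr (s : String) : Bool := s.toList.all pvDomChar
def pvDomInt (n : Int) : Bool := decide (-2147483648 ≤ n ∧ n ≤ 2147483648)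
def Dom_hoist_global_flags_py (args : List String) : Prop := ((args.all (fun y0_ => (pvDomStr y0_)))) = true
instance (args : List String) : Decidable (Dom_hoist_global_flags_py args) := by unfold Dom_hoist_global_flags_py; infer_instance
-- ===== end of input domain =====

-- B replaces A's seen_double_dash state machine by computing the '--' cut index first,
-- then partitioning only the prefix with two filters (simpler decomposition; same cost).


-- ===== PORT A =====
-- A's loop: state (flags, rest, seen_double_dash), branches in A's order.
def hoistLoop : List String → List String → List String → Bool → List String
  | [], flags, rest, _ => flags ++ rest
  | tok :: ts, flags, rest, seen =>
    if seen then hoistLoop ts flags (rest ++ [tok]) seen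
    else if tok == "--" then hoistLoop ts flags (rest ++ [tok]) true
    else if tok == "--json" || tok == "--no-json" then hoistLoop ts (flags ++ [tok]) rest seen
    else hoistLoop ts flags (rest ++ [tok]) seen

def hoist_global_flags_py (args : List String) : List String :=
  hoistLoop args [] [] false

-- ===== PORT B =====
-- cut = args.index('--') (try/except → length on ValueError); slice, filter, concatenate.
def hoist_global_flags_py_alt (args : List String) : List String :=
  let cut : Nat := match PySem.List.index? args "--" with
    | some i => i
    | none => args.length
  let head := PySem.List.slice args none (some (cut : Int))
  let tail := PySem.List.slice args (some (cut : Int)) none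
  let flags := head.filter (fun t => t == "--json" || t == "--no-json")
  let rest := (head.filter (fun t => !(t == "--json" || t == "--no-json"))) ++ tail
  flags ++ rest

-- ===== PRECONDITION & SPEC =====
def Spec_hoist_global_flags_py (args : List String) (out : List String) : Prop := out = hoist_global_flags_py_alt args
instance (args : List String) (out : List String) : Decidable (Spec_hoist_global_flags_py args out) := by unfold Spec_hoist_global_flags_py; infer_instance

-- ===== CLAIM (what is proved, stated in full; the proofs are below) =====
def Claim_equal_hoist_global_flags_py : Prop := ∀ (args : List String), Dom_hoist_global_flags_py args → Spec_hoist_global_flags_py args (hoist_global_flags_py args)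

-- ===== LEMMAS AND PROOFS =====

theorem hoistLoop_seen (ts : List String) : ∀ flags rest,
    hoistLoop ts flags rest true = flags ++ rest ++ ts := by
  induction ts with
  | nil => intro flags rest; simp [hoistLoop]
  | cons tok ts ih =>
    intro flags rest
    simp [hoistLoop, ih]

theorem hoistLoop_unseen (ts : List String) : ∀ flags rest,
    hoistLoop ts flags rest false =
      (flags ++ (ts.takeWhile (fun t => !(t == "--"))).filter
          (fun t => t == "--json" || t == "--no-json")) ++
      (rest ++ (ts.takeWhile (fun t => !(t == "--"))).filter
          (fun t => !(t == "--json" || t == "--no-json")) ++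
        ts.dropWhile (fun t => !(t == "--"))) := by
  induction ts with
  | nil => intro flags rest; simp [hoistLoop]
  | cons tok ts ih =>
    intro flags rest
    by_cases hdd : tok = "--"
    · subst hdd
      simp [hoistLoop, hoistLoop_seen, List.takeWhile, List.dropWhile]
    · by_cases hf : (tok == "--json" || tok == "--no-json") = true
      · have hne : (tok == "--") = false := by simp [hdd]
        have hnf : (!(tok == "--json") && !(tok == "--no-json")) = false := by
          cases h1 : tok == "--json" <;> cases h2 : tok == "--no-json" <;> simp_all
        simp [hoistLoop, hne, hf, hnf, ih, List.takeWhile, List.dropWhile]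
      · have hne : (tok == "--") = false := by simp [hdd]
        have hnf : (!(tok == "--json") && !(tok == "--no-json")) = true := by
          cases h1 : tok == "--json" <;> cases h2 : tok == "--no-json" <;> simp_all
        simp [hoistLoop, hne, hf, hnf, ih, List.takeWhile, List.dropWhile]

-- B's cut / slices are the takeWhile/dropWhile split at the first "--".
theorem cut_split (xs : List String) :
    xs.take (match PySem.List.index? xs "--" with
              | some i => i | none => xs.length) = xs.takeWhile (fun t => !(t == "--")) ∧
    xs.drop (match PySem.List.index? xs "--" with
              | some i => i | none => xs.length) = xs.dropWhile (fun t => !(t == "--")) := by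
  induction xs with
  | nil => simp [PySem.List.index?]
  | cons x xs ih =>
    by_cases hx : x = "--"
    · subst hx
      rw [PySem.List.index?_cons_self]
      simp [List.takeWhile, List.dropWhile]
    · rw [PySem.List.index?_cons_of_ne xs hx]
      have hb : (x == "--") = false := by simp [hx]
      cases h : PySem.List.index? xs "--" with
      | none =>
        simp only [h, Option.map_none] at *
        simp [List.takeWhile, List.dropWhile, hb, ih.1, ih.2]
      | some i =>
        simp only [h, Option.map_some] at *
        simp [List.takeWhile, List.dropWhile, hb, ih.1, ih.2]

-- ===== VERDICT (by name: the statement is the Claim_ definition above) =====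
theorem hoist_global_flags_py_spec : Claim_equal_hoist_global_flags_py := by
  intro args _
  unfold Spec_hoist_global_flags_py
  simp only [hoist_global_flags_py, hoist_global_flags_py_alt]
  rw [PySem.List.slice_to_natCast, PySem.List.slice_from_natCast,
      (cut_split args).1, (cut_split args).2, hoistLoop_unseen]
  simp
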